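-- pv_equiv track=rewrite | github.com/nyghtly-derek/advent-of-py | 03/spiralsum.py | build_spiral_map
-- ===== SOURCE A (Python) =====
-- def build_spiral_map(target):
--     smap = {(0,0):1}
--     pos = (1,0)
--     lvl = 1
--     next_lvl = 2
--     solved = False
--     while not solved:
--         while lvl < next_lvl:
--             smap[pos] = calc_next_value(pos, smap)
--             if smap[pos] >= target:
--                 solved = True
--                 break
--             pos = update_pos(pos, lvl)
--             if pos[0] > lvl:
--                 lvl += 1
--                 next_lvl += 1
--     return smap
--
-- def calc_next_value(pos, smap):
--     total = 0
--     positions = []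
--     for x in range(-1,2):
--         for y in range(-1,2):
--             if not (x == 0 and y == 0):
--                 new = (pos[0] + x, pos[1] + y)
--                 positions.append(new)
--     for newpos in positions:
--         if newpos in smap:
--             total += smap[newpos]
--     return total
--
-- def update_pos(pos, level):
--     if pos == (level, -level):
--         # pos is southeast corner of current level
--         return (pos[0] + 1, pos[1])
--     elif pos[0] == level and pos[1] != level:
--         # pos is east but not northeast corner
--         return (pos[0], pos[1] + 1)
--     elif pos[0] != -level and pos[1] == level:
--         # north except northwest corner
--         return (pos[0] - 1, pos[1])
--     elif pos[0] == -level and pos[1] != -level: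
--         # west except southwest corner
--         return (pos[0], pos[1] - 1)
--     else:
--         # south except southeast corner
--         return (pos[0] + 1, pos[1])
-- ===== SOURCE B (Python) =====
-- def build_spiral_map(target):
--     smap = {(0, 0): 1}
--     x, y = 1, 0
--     dirs = ((0, 1), (-1, 0), (0, -1), (1, 0))
--     d = 0      # direction index: up, left, down, right
--     run = 1    # length of the current straight run
--     left = 1   # moves remaining in the current run
--     while True:
--         v = 0
--         for dx in (-1, 0, 1):
--             for dy in (-1, 0, 1):
--                 if (dx, dy) != (0, 0):
--                     v += smap.get((x + dx, y + dy), 0)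
--         smap[(x, y)] = v
--         if v >= target:
--             return smap
--         if left == 0:
--             d = (d + 1) % 4
--             if d % 2 == 1:
--                 run += 1
--             left = run
--         x += dirs[d][0]
--         y += dirs[d][1]
--         left -= 1
-- ===== Notes on version B (the rewrite author's own statement) =====
-- stated objective: simpler
-- what changed: Replaces A's level/corner case-analysis (update_pos with five geometric branches plus lvl/next_lvl bookkeeping) by a run-length spiral walk (direction cycle up/left/down/right with run lengths 1,2,2,3,3,...), and reads each neighbor with dict.get(...,0) instead of building a candidate list and testing membership.
import Mathlib
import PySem

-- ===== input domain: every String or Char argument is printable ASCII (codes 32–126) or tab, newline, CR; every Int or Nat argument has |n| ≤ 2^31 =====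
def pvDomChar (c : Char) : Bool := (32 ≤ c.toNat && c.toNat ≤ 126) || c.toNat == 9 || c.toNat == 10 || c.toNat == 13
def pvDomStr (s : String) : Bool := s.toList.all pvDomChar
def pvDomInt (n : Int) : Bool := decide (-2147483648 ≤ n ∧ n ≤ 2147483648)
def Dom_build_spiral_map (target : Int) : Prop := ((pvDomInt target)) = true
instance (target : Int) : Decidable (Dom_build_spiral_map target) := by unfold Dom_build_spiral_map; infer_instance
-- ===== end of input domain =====

-- B replaces A's per-level corner-case `update_pos` machinery with a run-length spiral walk
-- (direction cycle up/left/down/right, run lengths 1,2,2,3,3,…) and reads neighbours with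
-- dict.get(…, 0) instead of building a candidate list and testing membership (objective: simpler).
-- Both loops run on a fuel counter of 200 steps, which the Python loops never reach for any
-- |target| ≤ 2^31 (the walk reaches the value 3 813 299 996 ≥ 2^31 after 145 emitted cells).

-- ===== PORT A =====
def calc_next_value (pos : Int × Int) (smap : PySem.Dict (Int × Int) Int) : Int :=
  -- positions list built by the double range(-1,2) loop, then summed by membership
  let positions : List (Int × Int) :=
    (PySem.List.pyRange (-1) 2 1).foldl (fun acc x =>
      (PySem.List.pyRange (-1) 2 1).foldl (fun acc y =>
        if ¬ (x = 0 ∧ y = 0) then acc ++ [(pos.1 + x, pos.2 + y)] else acc) acc) []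
  positions.foldl (fun total newpos =>
    if smap.contains newpos then total + (smap.get? newpos).getD 0 else total) 0

def update_pos (pos : Int × Int) (level : Int) : Int × Int :=
  if pos = (level, -level) then (pos.1 + 1, pos.2)
  else if pos.1 = level ∧ pos.2 ≠ level then (pos.1, pos.2 + 1)
  else if pos.1 ≠ -level ∧ pos.2 = level then (pos.1 - 1, pos.2)
  else if pos.1 = -level ∧ pos.2 ≠ -level then (pos.1, pos.2 - 1)
  else (pos.1 + 1, pos.2)

-- A's `while not solved` / `while lvl < next_lvl` pair: lvl < next_lvl holds at every
-- iteration (both are incremented together), so the pair is a single loop; fuel only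
-- makes it total (Python terminates well inside 200 steps on the whole stated domain).
def loopA (fuel : Nat) (target : Int) (smap : PySem.Dict (Int × Int) Int)
    (pos : Int × Int) (lvl next_lvl : Int) : PySem.Dict (Int × Int) Int :=
  match fuel with
  | 0 => smap
  | fuel + 1 =>
    let v := calc_next_value pos smap
    let smap' := smap.insert pos v
    if v ≥ target then smap'
    else
      let pos' := update_pos pos lvl
      if pos'.1 > lvl then loopA fuel target smap' pos' (lvl + 1) (next_lvl + 1)
      else loopA fuel target smap' pos' lvl next_lvl

def build_spiral_map (target : Int) : List (Int × Int × Int) :=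
  (loopA 200 target (PySem.Dict.ofList [((0, 0), 1)]) (1, 0) 1 2).items.map
    (fun p => (p.1.1, p.1.2, p.2))

-- ===== PORT B =====
-- dirs[d] for d = 0..3 (d is always kept in 0..3 by the % 4)
def dirVec (d : Nat) : Int × Int :=
  [((0 : Int), (1 : Int)), (-1, 0), (0, -1), (1, 0)].getD d (0, 0)

def loopB (fuel : Nat) (target : Int) (smap : PySem.Dict (Int × Int) Int)
    (x y : Int) (d : Nat) (run left : Int) : PySem.Dict (Int × Int) Int :=
  match fuel with
  | 0 => smap
  | fuel + 1 =>
    let v := ([(-1 : Int), 0, 1]).foldl (fun v dx =>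
      ([(-1 : Int), 0, 1]).foldl (fun v dy =>
        if ¬ (dx = 0 ∧ dy = 0) then v + smap.getD (x + dx, y + dy) 0 else v) v) 0
    let smap' := smap.insert (x, y) v
    if v ≥ target then smap'
    else
      let d' := if left = 0 then (d + 1) % 4 else d
      let run' := if left = 0 then (if d' % 2 = 1 then run + 1 else run) else run
      let left1 := if left = 0 then run' else left
      let dv := dirVec d'
      loopB fuel target smap' (x + dv.1) (y + dv.2) d' run' (left1 - 1)

def build_spiral_map_alt (target : Int) : List (Int × Int × Int) :=
  (loopB 200 target (PySem.Dict.ofList [((0, 0), 1)]) 1 0 0 1 1).items.map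
    (fun p => (p.1.1, p.1.2, p.2))

-- ===== PRECONDITION & SPEC =====
def Spec_build_spiral_map (target : Int) (out : List (Int × Int × Int)) : Prop := out = build_spiral_map_alt target
instance (target : Int) (out : List (Int × Int × Int)) : Decidable (Spec_build_spiral_map target out) := by unfold Spec_build_spiral_map; infer_instance

-- ===== CLAIM (what is proved, stated in full; the proofs are below) =====
def Claim_equal_build_spiral_map : Prop := ∀ (target : Int), Dom_build_spiral_map target → Spec_build_spiral_map target (build_spiral_map target)

-- ===== LEMMAS AND PROOFS =====

-- pure position dynamics of A: state (pos, lvl, next_lvl)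
def stepA (s : (Int × Int) × Int × Int) : (Int × Int) × Int × Int :=
  let pos' := update_pos s.1 s.2.1
  if pos'.1 > s.2.1 then (pos', s.2.1 + 1, s.2.2 + 1) else (pos', s.2.1, s.2.2)

-- pure position dynamics of B: state ((x,y), d, run, left)
def stepB (s : (Int × Int) × Nat × Int × Int) : (Int × Int) × Nat × Int × Int :=
  match s with
  | ((x, y), d, run, left) =>
    let d' := if left = 0 then (d + 1) % 4 else d
    let run' := if left = 0 then (if d' % 2 = 1 then run + 1 else run) else run
    let left1 := if left = 0 then run' else left
    let dv := dirVec d'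
    ((x + dv.1, y + dv.2), d', run', left1 - 1)

def trailA : Nat → ((Int × Int) × Int × Int) → List (Int × Int)
  | 0, _ => []
  | n + 1, s => s.1 :: trailA n (stepA s)

def trailB : Nat → ((Int × Int) × Nat × Int × Int) → List (Int × Int)
  | 0, _ => []
  | n + 1, s => s.1 :: trailB n (stepB s)

lemma memberAdd (smap : PySem.Dict (Int × Int) Int) (k : Int × Int) (t : Int) :
    (if smap.contains k then t + (smap.get? k).getD 0 else t) = t + smap.getD k 0 := by
  by_cases h : smap.contains k
  · simp [h, PySem.Dict.getD_eq_get?_getD]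
  · simp at h
    simp [h, PySem.Dict.getD_of_not_contains]

lemma value_eq (pos : Int × Int) (smap : PySem.Dict (Int × Int) Int) :
    calc_next_value pos smap =
      ([(-1 : Int), 0, 1]).foldl (fun v dx =>
        ([(-1 : Int), 0, 1]).foldl (fun v dy =>
          if ¬ (dx = 0 ∧ dy = 0) then v + smap.getD (pos.1 + dx, pos.2 + dy) 0 else v) v) 0 := by
  have hr : PySem.List.pyRange (-1) 2 1 = [-1, 0, 1] := by decide
  simp only [calc_next_value, hr, List.foldl]
  norm_num [memberAdd]

lemma loop_eq : ∀ (fuel : Nat) (target : Int) (smap : PySem.Dict (Int × Int) Int)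
    (sA : (Int × Int) × Int × Int) (sB : (Int × Int) × Nat × Int × Int),
    trailA fuel sA = trailB fuel sB →
    loopA fuel target smap sA.1 sA.2.1 sA.2.2 =
      loopB fuel target smap sB.1.1 sB.1.2 sB.2.1 sB.2.2.1 sB.2.2.2 := by
  intro fuel
  induction fuel with
  | zero => intro _ _ _ _ _; rfl
  | succ n ih =>
    intro target smap sA sB h
    obtain ⟨⟨ax, ay⟩, alvl, anl⟩ := sA
    obtain ⟨⟨bx, by'⟩, bd, brun, bleft⟩ := sB
    simp only [trailA, trailB] at h
    injection h with hpos htail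
    injection hpos with hx hy
    subst hx; subst hy
    show loopA (n + 1) target smap (ax, ay) alvl anl =
      loopB (n + 1) target smap ax ay bd brun bleft
    simp only [loopA, loopB]
    rw [value_eq]
    set v := ([(-1 : Int), 0, 1]).foldl (fun v dx =>
        ([(-1 : Int), 0, 1]).foldl (fun v dy =>
          if ¬ (dx = 0 ∧ dy = 0) then v + smap.getD ((ax, ay).1 + dx, (ax, ay).2 + dy) 0 else v) v) 0 with hv
    by_cases hge : v ≥ target
    · simp [hge]
    · simp only [hge, if_false]
      -- relate the recursive calls to stepA / stepB via htail and ih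
      have hA : ∀ (sm : PySem.Dict (Int × Int) Int),
          (if (update_pos (ax, ay) alvl).1 > alvl then
            loopA n target sm (update_pos (ax, ay) alvl) (alvl + 1) (anl + 1)
          else loopA n target sm (update_pos (ax, ay) alvl) alvl anl) =
          loopA n target sm (stepA ((ax, ay), alvl, anl)).1
            (stepA ((ax, ay), alvl, anl)).2.1 (stepA ((ax, ay), alvl, anl)).2.2 := by
        intro sm
        by_cases hb : (update_pos (ax, ay) alvl).1 > alvl <;> simp [stepA, hb]
      rw [hA]
      have hB := ih target (smap.insert (ax, ay) v)
        (stepA ((ax, ay), alvl, anl)) (stepB ((ax, ay), bd, brun, bleft)) htail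
      rw [hB]
      rfl

set_option maxRecDepth 100000 in
lemma trail_init : trailA 200 ((1, 0), 1, 2) = trailB 200 ((1, 0), 0, 1, 1) := by decide

-- ===== VERDICT (by name: the statement is the Claim_ definition above) =====
theorem build_spiral_map_spec : Claim_equal_build_spiral_map := by
  intro target _
  show build_spiral_map target = build_spiral_map_alt target
  unfold build_spiral_map build_spiral_map_alt
  rw [loop_eq 200 target _ ((1, 0), 1, 2) ((1, 0), 0, 1, 1) trail_init]
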